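-- pv_equiv track=rewrite | github.com/stelviodev/stelvio | stelvio/aws/function.py | _to_valid_python_class_name
-- ===== SOURCE A (Python) =====
-- NUMBER_WORDS = {
--     "0": "Zero",
--     "1": "One",
--     "2": "Two",
--     "3": "Three",
--     "4": "Four",
--     "5": "Five",
--     "6": "Six",
--     "7": "Seven",
--     "8": "Eight",
--     "9": "Nine",
-- }
--
-- def _to_valid_python_class_name(aws_name: str) -> str:
--     # Split and clean
--     words = aws_name.replace("-", " ").replace(".", " ").replace("_", " ").split()
--     cleaned_words = ["".join(c for c in word if c.isalnum()) for word in words]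
--     class_name = "".join(word.capitalize() for word in cleaned_words)
--
--     # Convert only first digit if name starts with number
--     if class_name and class_name[0].isdigit():
--         first_digit = NUMBER_WORDS[class_name[0]]
--         class_name = first_digit + class_name[1:]
--
--     return class_name
-- ===== SOURCE B (Python) =====
-- NUMBER_WORDS = {
--     "0": "Zero",
--     "1": "One",
--     "2": "Two",
--     "3": "Three",
--     "4": "Four",
--     "5": "Five",
--     "6": "Six",
--     "7": "Seven",
--     "8": "Eight",
--     "9": "Nine",
-- }
--
-- def _to_valid_python_class_name(aws_name: str) -> str:
--     # Single pass: flush the current word at separators, keep alnum chars, drop the rest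
--     words = []
--     buf = []
--     for ch in aws_name:
--         if ch in "-._" or ch.isspace():
--             if buf:
--                 words.append("".join(buf))
--             buf = []
--         elif ch.isalnum():
--             buf.append(ch)
--     if buf:
--         words.append("".join(buf))
--     class_name = "".join(w.capitalize() for w in words)
--     if class_name and class_name[0].isdigit():
--         class_name = NUMBER_WORDS[class_name[0]] + class_name[1:]
--     return class_name
-- ===== Notes on version B (the rewrite author's own statement) =====
-- stated objective: alternative
-- what changed: Replaced the replace/split/per-word-filter/capitalize multi-pass pipeline with a single left-to-right pass over the characters that maintains a current-word buffer and a word list, then capitalizes and joins the collected words.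
import Mathlib
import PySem

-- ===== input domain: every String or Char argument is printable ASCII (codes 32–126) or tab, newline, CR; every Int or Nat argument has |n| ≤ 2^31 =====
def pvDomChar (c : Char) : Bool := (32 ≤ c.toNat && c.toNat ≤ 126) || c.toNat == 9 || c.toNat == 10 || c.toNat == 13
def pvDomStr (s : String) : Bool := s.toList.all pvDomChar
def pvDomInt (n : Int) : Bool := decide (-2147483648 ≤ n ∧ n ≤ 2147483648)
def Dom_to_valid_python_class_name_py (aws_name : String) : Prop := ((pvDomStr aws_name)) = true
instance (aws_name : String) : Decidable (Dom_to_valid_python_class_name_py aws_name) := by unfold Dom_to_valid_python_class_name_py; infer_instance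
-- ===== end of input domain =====

-- B replaces A's replace/split/filter/capitalize pipeline by a single left-to-right pass with a
-- word buffer (objective: alternative decomposition, one traversal instead of four passes).


-- ===== PORT A =====

-- str.capitalize (exact on the ASCII domain: first char uppercased, the rest lowercased)
def pyCapitalize (w : List Char) : List Char :=
  match w with
  | [] => []
  | c :: rest => PySem.Chars.upperChar c :: PySem.Chars.lower rest

def NUMBER_WORDS : PySem.Dict (List Char) (List Char) :=
  PySem.Dict.ofList
    [(['0'], "Zero".toList), (['1'], "One".toList), (['2'], "Two".toList),
     (['3'], "Three".toList), (['4'], "Four".toList), (['5'], "Five".toList),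
     (['6'], "Six".toList), (['7'], "Seven".toList), (['8'], "Eight".toList),
     (['9'], "Nine".toList)]

def to_valid_python_class_name_py (aws_name : String) : String :=
  let words := PySem.Chars.split₀
    (PySem.Chars.replace
      (PySem.Chars.replace
        (PySem.Chars.replace aws_name.toList ['-'] [' ']) ['.'] [' ']) ['_'] [' '])
  let cleaned_words := words.map (fun w => w.filter (fun c => PySem.Chars.isalnum c))
  let class_name := PySem.Chars.join [] (cleaned_words.map pyCapitalize)
  match class_name with
  | [] => String.ofList []
  | c :: rest =>
    if PySem.Chars.isdigit c then
      -- NUMBER_WORDS[class_name[0]]: on the ASCII domain isdigit c means c ∈ '0'..'9', the key is present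
      String.ofList (((NUMBER_WORDS.get? [c]).getD []) ++ rest)
    else String.ofList (c :: rest)

-- ===== PORT B =====

-- one loop step: separator flushes the buffer, alnum extends it, anything else is dropped
def altStep (st : List (List Char) × List Char) (c : Char) : List (List Char) × List Char :=
  if c = '-' ∨ c = '.' ∨ c = '_' ∨ PySem.Chars.isspace c = true then
    (if st.2 = [] then st.1 else st.1 ++ [st.2], [])
  else if PySem.Chars.isalnum c then (st.1, st.2 ++ [c])
  else st

def to_valid_python_class_name_py_alt (aws_name : String) : String :=
  let st := aws_name.toList.foldl altStep ([], [])
  let words := if st.2 = [] then st.1 else st.1 ++ [st.2]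
  let class_name := PySem.Chars.join [] (words.map pyCapitalize)
  match class_name with
  | [] => String.ofList []
  | c :: rest =>
    if PySem.Chars.isdigit c then
      String.ofList (((NUMBER_WORDS.get? [c]).getD []) ++ rest)
    else String.ofList (c :: rest)

-- ===== PRECONDITION & SPEC =====
def Spec_to_valid_python_class_name_py (aws_name : String) (out : String) : Prop := out = to_valid_python_class_name_py_alt aws_name
instance (aws_name : String) (out : String) : Decidable (Spec_to_valid_python_class_name_py aws_name out) := by unfold Spec_to_valid_python_class_name_py; infer_instance

-- ===== CLAIM (what is proved, stated in full; the proofs are below) =====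
def Claim_equal_to_valid_python_class_name_py : Prop := ∀ (aws_name : String), Dom_to_valid_python_class_name_py aws_name → Spec_to_valid_python_class_name_py aws_name (to_valid_python_class_name_py aws_name)

-- ===== LEMMAS AND PROOFS =====

-- keep only alnum chars of a word (A's cleaning step)
def cleanW (w : List Char) : List Char := w.filter (fun c => PySem.Chars.isalnum c)

-- the combined effect of A's three single-char replaces
def sigmaA (c : Char) : Char :=
  if c = '-' then ' ' else if c = '.' then ' ' else if c = '_' then ' ' else c

lemma replace_go_single (a b : Char) :
    ∀ (fuel : Nat) (l acc : List Char), l.length ≤ fuel →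
      PySem.Chars.replace.go [a] [b] fuel l acc
        = acc.reverse ++ l.map (fun c => if c = a then b else c) := by
  intro fuel
  induction fuel with
  | zero =>
    intro l acc h
    have : l = [] := by cases l <;> simp_all
    subst this
    simp [PySem.Chars.replace.go]
  | succ n ih =>
    intro l acc h
    cases l with
    | nil => simp [PySem.Chars.replace.go]
    | cons c t =>
      by_cases hc : c = a
      · subst hc
        have hpre : [c].isPrefixOf (c :: t) = true := by simp [List.isPrefixOf]
        rw [PySem.Chars.replace.go]
        simp only [hpre, if_true]
        have hdrop : List.drop [c].length (c :: t) = t := by simp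
        rw [hdrop, ih t ([b].reverse ++ acc) (by simpa using h)]
        simp
      · have hpre : [a].isPrefixOf (c :: t) = false := by
          simp [List.isPrefixOf]; exact fun hh => (hc hh.symm).elim
        rw [PySem.Chars.replace.go]
        simp only [hpre, Bool.false_eq_true, if_false]
        rw [ih t (c :: acc) (by simpa using h)]
        simp [hc]

lemma replace_single (s : List Char) (a b : Char) :
    PySem.Chars.replace s [a] [b] = s.map (fun c => if c = a then b else c) := by
  rw [PySem.Chars.replace]
  simp only [List.isEmpty_cons, Bool.false_eq_true, if_false]
  simpa using replace_go_single a b s.length s [] (le_refl _)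

lemma replace3_eq (s : List Char) :
    PySem.Chars.replace (PySem.Chars.replace (PySem.Chars.replace s ['-'] [' ']) ['.'] [' ']) ['_'] [' ']
      = s.map sigmaA := by
  simp only [replace_single, List.map_map]
  apply List.map_congr_left
  intro c _
  simp only [Function.comp, sigmaA]
  split_ifs <;> simp_all

lemma isspace_sigma (c : Char) :
    PySem.Chars.isspace (sigmaA c) = true ↔
      (c = '-' ∨ c = '.' ∨ c = '_' ∨ PySem.Chars.isspace c = true) := by
  unfold sigmaA
  split_ifs with h1 h2 h3 <;> simp_all <;> decide

lemma clean_snoc (w : List Char) (c : Char) :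
    cleanW (w ++ [c]) = cleanW w ++ (if PySem.Chars.isalnum c then [c] else []) := by
  simp [cleanW, List.filter_append]
  split_ifs <;> simp_all

lemma main_go : ∀ (l cur : List Char) (ws : List (List Char)),
    (let st := l.foldl altStep ((ws.map cleanW).filter (· ≠ []), cleanW cur.reverse);
      if st.2 = [] then st.1 else st.1 ++ [st.2])
    = ((PySem.Chars.split₀.go (l.map sigmaA) cur ws.reverse).map cleanW).filter (· ≠ []) := by
  intro l
  induction l with
  | nil =>
    intro cur ws
    rw [List.map_nil]
    by_cases hcur : cur = []
    · subst hcur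
      have hgo : PySem.Chars.split₀.go [] [] ws.reverse = ws := by
        rw [PySem.Chars.split₀.go]; simp
      rw [hgo]; simp [cleanW]
    · have hgo : PySem.Chars.split₀.go [] cur ws.reverse = ws ++ [cur.reverse] := by
        rw [PySem.Chars.split₀.go]; simp [hcur]
      rw [hgo]
      simp only [List.foldl_nil, List.map_append, List.filter_append, List.map_cons,
        List.map_nil, List.filter_cons, List.filter_nil]
      by_cases hb : cleanW cur.reverse = [] <;> simp [hb]
  | cons c rest ih =>
    intro cur ws
    simp only [List.map_cons, List.foldl_cons]
    by_cases hsep : (c = '-' ∨ c = '.' ∨ c = '_' ∨ PySem.Chars.isspace c = true)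
    · have hsp : PySem.Chars.isspace (sigmaA c) = true := (isspace_sigma c).mpr hsep
      by_cases hcur : cur = []
      · subst hcur
        have hgo : PySem.Chars.split₀.go (sigmaA c :: rest.map sigmaA) [] ws.reverse
            = PySem.Chars.split₀.go (rest.map sigmaA) [] ws.reverse := by
          rw [PySem.Chars.split₀.go]; simp [hsp]
        rw [hgo]
        have hstep : altStep ((ws.map cleanW).filter (· ≠ []), cleanW List.nil.reverse) c
            = ((ws.map cleanW).filter (· ≠ []), cleanW List.nil.reverse) := by
          simp [altStep, hsep, cleanW]
        rw [hstep]
        exact ih [] ws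
      · have hie : cur.isEmpty = false := by simp [hcur]
        have hgo : PySem.Chars.split₀.go (sigmaA c :: rest.map sigmaA) cur ws.reverse
            = PySem.Chars.split₀.go (rest.map sigmaA) [] ((ws ++ [cur.reverse]).reverse) := by
          rw [PySem.Chars.split₀.go]; simp [hsp, hie]
        rw [hgo]
        have hF : ((ws ++ [cur.reverse]).map cleanW).filter (· ≠ [])
            = (ws.map cleanW).filter (· ≠ [])
              ++ (if cleanW cur.reverse = [] then [] else [cleanW cur.reverse]) := by
          simp [List.filter_append]
          split_ifs <;> simp_all
        have hstep : altStep ((ws.map cleanW).filter (· ≠ []), cleanW cur.reverse) c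
            = ((ws.map cleanW).filter (· ≠ [])
                ++ (if cleanW cur.reverse = [] then [] else [cleanW cur.reverse]), []) := by
          simp only [altStep, hsep, if_true]
          split_ifs <;> simp_all
        rw [hstep]
        have hIH := ih [] (ws ++ [cur.reverse])
        rw [hF] at hIH
        simpa [cleanW] using hIH
    · have hsp : PySem.Chars.isspace (sigmaA c) = false := by
        rcases h : PySem.Chars.isspace (sigmaA c) with _ | _
        · rfl
        · exact absurd ((isspace_sigma c).mp h) hsep
      have hgo : PySem.Chars.split₀.go (sigmaA c :: rest.map sigmaA) cur ws.reverse
          = PySem.Chars.split₀.go (rest.map sigmaA) (sigmaA c :: cur) ws.reverse := by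
        rw [PySem.Chars.split₀.go]; simp [hsp]
      rw [hgo]
      have hsig : sigmaA c = c := by
        unfold sigmaA
        split_ifs with h1 h2 h3 <;> first | rfl | exact absurd (by tauto) hsep
      rw [hsig]
      have hIH := ih (c :: cur) ws
      rw [← hIH]
      have hrev : (c :: cur).reverse = cur.reverse ++ [c] := by simp
      rw [hrev, clean_snoc]
      by_cases hal : PySem.Chars.isalnum c = true
      · simp only [altStep, hsep, if_false, hal, if_true]
      · simp only [altStep, hsep, if_false, hal]
        simp

lemma join_nil_eq_flatten (xs : List (List Char)) : PySem.Chars.join [] xs = xs.flatten := by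
  induction xs with
  | nil => simp [PySem.Chars.join_nil]
  | cons a l ih =>
    cases l with
    | nil => simp [PySem.Chars.join_singleton]
    | cons b r => rw [PySem.Chars.join_cons_cons]; simp_all

lemma cap_eq_nil_iff (w : List Char) : pyCapitalize w = [] ↔ w = [] := by
  cases w <;> simp [pyCapitalize]

lemma join_cap_filter (xs : List (List Char)) :
    PySem.Chars.join [] ((xs.filter (· ≠ [])).map pyCapitalize)
      = PySem.Chars.join [] (xs.map pyCapitalize) := by
  rw [join_nil_eq_flatten, join_nil_eq_flatten, ← List.flatten_filter_ne_nil (L := xs.map pyCapitalize)]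
  congr 1
  rw [List.filter_map]
  congr 1
  apply List.filter_congr
  intro w _
  simp [cap_eq_nil_iff]

lemma ports_eq (s : String) :
    to_valid_python_class_name_py s = to_valid_python_class_name_py_alt s := by
  unfold to_valid_python_class_name_py to_valid_python_class_name_py_alt
  have hwords := main_go s.toList [] []
  simp only [List.map_nil, List.filter_nil, List.reverse_nil, cleanW] at hwords
  have hcl :
      PySem.Chars.join []
        (((PySem.Chars.split₀
            (PySem.Chars.replace
              (PySem.Chars.replace
                (PySem.Chars.replace s.toList ['-'] [' ']) ['.'] [' ']) ['_'] [' '])).map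
          (fun w => w.filter (fun c => PySem.Chars.isalnum c))).map pyCapitalize)
      = PySem.Chars.join []
          ((let st := s.toList.foldl altStep ([], []);
            if st.2 = [] then st.1 else st.1 ++ [st.2]).map pyCapitalize) := by
    rw [replace3_eq]
    rw [show (fun w => w.filter (fun c => PySem.Chars.isalnum c)) = cleanW from rfl]
    simp only [hwords, PySem.Chars.split₀]
    rw [join_cap_filter]
  simp only [hcl]

-- ===== VERDICT (by name: the statement is the Claim_ definition above) =====
theorem to_valid_python_class_name_py_spec : Claim_equal_to_valid_python_class_name_py := by
  intro s _
  unfold Spec_to_valid_python_class_name_py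
  exact ports_eq s
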